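-- pv_equiv track=rewrite | github.com/bphillab/Five_Thirty_Eight_Riddler | Riddler_19_04_26/Riddler_Classic_19_04_26.py | determine_handled_cases
-- ===== SOURCE A (Python) =====
-- def player_sees(id, scen):
--     return str(scen[:id] + [0] + scen[id + 1:])
--
-- def test_scen(scen, resp):
--     num_wins = 0
--     for i in range(len(scen)):
--         if resp[player_sees(i, scen)] == scen[i]:
--             num_wins = num_wins + 1
--     return num_wins
--
-- def generate_all_scen():
--     scens = []
--     for i in range(4):
--         for j in range(4):
--             for k in range(4):
--                 for l in range(4):
--                     scens += [[i + 1, j + 1, k + 1, l + 1]]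
--     return scens
--
-- def determine_handled_cases(resp, num_match_needed):
--     all_scens = generate_all_scen()
--     handled_cases = []
--     remaining_cases = []
--     dup_cases = []
--     for scen in all_scens:
--         try:
--             l = test_scen(scen, resp)
--             if l >= num_match_needed:
--                 handled_cases += [scen]
--             if l > num_match_needed:
--                 dup_cases += [scen]
--             if l < num_match_needed:
--                 remaining_cases += [scen]
--         except:
--             remaining_cases += [scen]
--     return handled_cases, remaining_cases, dup_cases
-- ===== SOURCE B (Python) =====
-- def determine_handled_cases(resp, num_match_needed):
--     # Inverted ("scatter") algorithm: instead of counting matches per scenario,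
--     # iterate over the 4*64 (position, visible-triple) pairs, look each masked
--     # key up ONCE, and scatter: a present answer v in 1..4 adds one match to the
--     # single scenario that has v at that position; a missing key marks all four
--     # extensions as broken.  A final pass reads the accumulated table.
--     vals = (1, 2, 3, 4)
--     counts = {}
--     broken = set()
--     for i in range(4):
--         for a in vals:
--             for b in vals:
--                 for c in vals:
--                     others = (a, b, c)
--                     key = str(list(others[:i]) + [0] + list(others[i:]))
--                     if key in resp:
--                         v = resp[key]
--                         if v in vals:
--                             scen = others[:i] + (v,) + others[i:]
--                             counts[scen] = counts.get(scen, 0) + 1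
--                     else:
--                         for v in vals:
--                             broken.add(others[:i] + (v,) + others[i:])
--     handled, remaining, dup = [], [], []
--     for a in vals:
--         for b in vals:
--             for c in vals:
--                 for d in vals:
--                     scen = (a, b, c, d)
--                     if scen in broken:
--                         remaining.append(list(scen))
--                     else:
--                         m = counts.get(scen, 0)
--                         if m >= num_match_needed:
--                             handled.append(list(scen))
--                         if m > num_match_needed:
--                             dup.append(list(scen))
--                         if m < num_match_needed:
--                             remaining.append(list(scen))
--     return handled, remaining, dup
-- ===== Notes on version B (the rewrite author's own statement) =====
-- stated objective: alternative
-- what changed: A scores each of the 256 scenarios by four dict lookups inside a try/except and files it into three accumulator lists; B inverts the iteration: it walks the 4*64 (position, visible-triple) pairs once, doing a single lookup per pair and scattering the result (a present answer in 1..4 bumps the match count of exactly one scenario in a dict, a missing key marks four scenarios broken in a set), then a final pass classifies each scenario from the accumulated tables.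
import Mathlib
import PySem

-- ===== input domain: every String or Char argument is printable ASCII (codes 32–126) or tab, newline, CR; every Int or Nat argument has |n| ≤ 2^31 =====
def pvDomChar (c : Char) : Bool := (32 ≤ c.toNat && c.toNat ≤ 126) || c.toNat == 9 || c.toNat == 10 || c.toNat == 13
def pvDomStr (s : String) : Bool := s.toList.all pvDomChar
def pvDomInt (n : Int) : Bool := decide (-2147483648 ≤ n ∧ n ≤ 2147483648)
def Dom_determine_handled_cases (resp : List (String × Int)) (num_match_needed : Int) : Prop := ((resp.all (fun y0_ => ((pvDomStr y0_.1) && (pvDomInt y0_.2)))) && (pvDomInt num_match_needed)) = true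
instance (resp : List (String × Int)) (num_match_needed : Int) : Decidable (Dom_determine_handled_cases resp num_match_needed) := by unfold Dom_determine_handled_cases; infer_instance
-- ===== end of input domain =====

-- B inverts the iteration: instead of scoring each of the 256 scenarios by four key lookups,
-- it scatters over the 4·64 (position, visible-triple) pairs — one lookup each — accumulating
-- per-scenario match counts in a dict and broken scenarios in a set, then classifies in a final
-- pass; alternative decomposition, same cost.

-- ===== PORT A =====

-- str(scen[:id] + [0] + scen[id+1:]) — Python list repr "[a, b, c]", built by hand (exact for int lists)
def pvPlayerSees (id : Int) (scen : List Int) : String :=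
  "[" ++ PySem.Str.join ", "
    ((PySem.List.slice scen none (some id) ++ [0] ++ PySem.List.slice scen (some (id + 1)) none).map
      PySem.Int.toStr) ++ "]"

-- test_scen: loop over range(len(scen)); a missing key (KeyError) makes the whole call raise → none
def pvTestScen (scen : List Int) (resp : PySem.Dict String Int) : Option Int :=
  (PySem.List.pyRange 0 (scen.length : Int) 1).foldl
    (fun o i => o.bind fun numWins =>
      (PySem.Dict.get? resp (pvPlayerSees i scen)).bind fun v =>
        (PySem.List.pyGet? scen i).map fun t =>
          if v = t then numWins + 1 else numWins)
    (some 0)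

def pvGenAllScen : List (List Int) :=
  (PySem.List.pyRange 0 4 1).foldl (fun acc i =>
    (PySem.List.pyRange 0 4 1).foldl (fun acc j =>
      (PySem.List.pyRange 0 4 1).foldl (fun acc k =>
        (PySem.List.pyRange 0 4 1).foldl (fun acc l =>
          acc ++ [[i + 1, j + 1, k + 1, l + 1]]) acc) acc) acc) []

def determine_handled_cases (resp : List (String × Int)) (num_match_needed : Int) : List (List Int) × List (List Int) × List (List Int) :=
  let d := PySem.Dict.mk resp
  let st := pvGenAllScen.foldl
    (fun (acc : List (List Int) × List (List Int) × List (List Int)) scen =>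
      match pvTestScen scen d with
      | some l =>
        let h := if l ≥ num_match_needed then acc.1 ++ [scen] else acc.1
        let du := if l > num_match_needed then acc.2.2 ++ [scen] else acc.2.2
        let r := if l < num_match_needed then acc.2.1 ++ [scen] else acc.2.1
        (h, r, du)
      | none => (acc.1, acc.2.1 ++ [scen], acc.2.2))
    ([], [], [])
  (st.1, st.2.1, st.2.2)

-- ===== PORT B =====

def pvVals : List Int := [1, 2, 3, 4]

-- str(list(others[:i]) + [0] + list(others[i:])) for the visible triple `others`
def pvSeenKey (i : Int) (others : List Int) : String :=
  "[" ++ PySem.Str.join ", "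
    ((PySem.List.slice others none (some i) ++ [0] ++ PySem.List.slice others (some i) none).map
      PySem.Int.toStr) ++ "]"

-- others[:i] + (v,) + others[i:]
def pvInsAt (i : Int) (others : List Int) (v : Int) : List Int :=
  PySem.List.slice others none (some i) ++ [v] ++ PySem.List.slice others (some i) none

-- the scatter pass: for each position i and each visible triple, one lookup;
-- a present answer in 1..4 bumps one scenario's count, a missing key marks 4 scenarios broken
def pvScatter (d : PySem.Dict String Int) :
    PySem.Dict (List Int) Int × PySem.Set (List Int) :=
  (PySem.List.pyRange 0 4 1).foldl (fun st i =>
    pvVals.foldl (fun st a =>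
      pvVals.foldl (fun st b =>
        pvVals.foldl (fun st c =>
          let others := [a, b, c]
          match PySem.Dict.get? d (pvSeenKey i others) with
          | some v =>
            if v ∈ pvVals then
              (st.1.modify (pvInsAt i others v) 0 (· + 1), st.2)
            else st
          | none =>
            (st.1, pvVals.foldl (fun s v => PySem.Set.add s (pvInsAt i others v)) st.2))
          st) st) st)
    (PySem.Dict.empty, PySem.Set.empty)

def determine_handled_cases_alt (resp : List (String × Int)) (num_match_needed : Int) : List (List Int) × List (List Int) × List (List Int) :=
  let d := PySem.Dict.mk resp
  let cb := pvScatter d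
  let st := pvVals.foldl (fun st a =>
    pvVals.foldl (fun st b =>
      pvVals.foldl (fun st c =>
        pvVals.foldl (fun (st : List (List Int) × List (List Int) × List (List Int)) dd =>
          let scen := [a, b, c, dd]
          if PySem.Set.contains cb.2 scen then
            (st.1, st.2.1 ++ [scen], st.2.2)
          else
            let m := cb.1.getD scen 0
            let h := if m ≥ num_match_needed then st.1 ++ [scen] else st.1
            let du := if m > num_match_needed then st.2.2 ++ [scen] else st.2.2
            let r := if m < num_match_needed then st.2.1 ++ [scen] else st.2.1
            (h, r, du)) st) st) st)
    ([], [], [])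
  (st.1, st.2.1, st.2.2)

-- ===== PRECONDITION & SPEC =====
def Spec_determine_handled_cases (resp : List (String × Int)) (num_match_needed : Int) (out : List (List Int) × List (List Int) × List (List Int)) : Prop := out = determine_handled_cases_alt resp num_match_needed
instance (resp : List (String × Int)) (num_match_needed : Int) (out : List (List Int) × List (List Int) × List (List Int)) : Decidable (Spec_determine_handled_cases resp num_match_needed out) := by unfold Spec_determine_handled_cases; infer_instance

-- ===== CLAIM (what is proved, stated in full; the proofs are below) =====
def Claim_equal_determine_handled_cases : Prop := ∀ (resp : List (String × Int)) (num_match_needed : Int), Dom_determine_handled_cases resp num_match_needed → Spec_determine_handled_cases resp num_match_needed (determine_handled_cases resp num_match_needed)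

-- ===== LEMMAS AND PROOFS =====

-- the 256 scenarios, as B's classification pass enumerates them
def pvScens : List (List Int) :=
  pvVals.flatMap fun a => pvVals.flatMap fun b => pvVals.flatMap fun c =>
    pvVals.map fun dd => [a, b, c, dd]

set_option maxRecDepth 8000 in
theorem pvGen_eq : pvGenAllScen = pvScens := by decide

-- the 4·64 (position, visible-triple) pairs the scatter pass walks, in order
def pvPairs : List (Int × List Int) :=
  ([0, 1, 2, 3] : List Int).flatMap fun i =>
    pvVals.flatMap fun a => pvVals.flatMap fun b => pvVals.map fun c => (i, [a, b, c])

def pvStepScatter (d : PySem.Dict String Int)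
    (st : PySem.Dict (List Int) Int × PySem.Set (List Int)) (p : Int × List Int) :
    PySem.Dict (List Int) Int × PySem.Set (List Int) :=
  match PySem.Dict.get? d (pvSeenKey p.1 p.2) with
  | some v =>
    if v ∈ pvVals then (st.1.modify (pvInsAt p.1 p.2 v) 0 (· + 1), st.2) else st
  | none =>
    (st.1, pvVals.foldl (fun s v => PySem.Set.add s (pvInsAt p.1 p.2 v)) st.2)

theorem pvScatter_eq_pairs (d : PySem.Dict String Int) :
    pvScatter d = pvPairs.foldl (pvStepScatter d) (PySem.Dict.empty, PySem.Set.empty) := by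
  unfold pvScatter pvPairs pvStepScatter
  rw [show PySem.List.pyRange 0 4 1 = ([0,1,2,3] : List Int) from by decide]
  simp only [List.foldl_flatMap, List.foldl_map]

-- hit p = the single scenario p's lookup scores (none when the key is missing or the answer is outside 1..4)
def pvHit (d : PySem.Dict String Int) (p : Int × List Int) : Option (List Int) :=
  match PySem.Dict.get? d (pvSeenKey p.1 p.2) with
  | some v => if v ∈ pvVals then some (pvInsAt p.1 p.2 v) else none
  | none => none

def pvMiss (d : PySem.Dict String Int) (p : Int × List Int) : List (List Int) :=
  match PySem.Dict.get? d (pvSeenKey p.1 p.2) with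
  | some _ => []
  | none => pvVals.map (pvInsAt p.1 p.2)

theorem pvScatter_closed (d : PySem.Dict String Int) (ps : List (Int × List Int))
    (m0 : PySem.Dict (List Int) Int) (s0 : PySem.Set (List Int)) :
    ps.foldl (pvStepScatter d) (m0, s0) =
      ((ps.filterMap (pvHit d)).foldl (fun m t => m.modify t 0 (· + 1)) m0,
       (ps.flatMap (pvMiss d)).foldl PySem.Set.add s0) := by
  induction ps generalizing m0 s0 with
  | nil => rfl
  | cons p t ih =>
    simp only [List.foldl_cons, List.filterMap_cons, List.flatMap_cons]
    cases hg : PySem.Dict.get? d (pvSeenKey p.1 p.2) with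
    | some v =>
      by_cases hv : v ∈ pvVals <;>
        simp [pvStepScatter, pvHit, pvMiss, hg, hv, ih]
    | none =>
      simp [pvStepScatter, pvHit, pvMiss, hg, ih, List.foldl_append, List.foldl_map]

-- counts.get(s, 0) after the scatter pass = how many pairs score s
theorem pvCounts_getD (d : PySem.Dict String Int) (s : List Int) :
    (pvScatter d).1.getD s 0 = pvPairs.countP (fun p => pvHit d p == some s) := by
  rw [pvScatter_eq_pairs, pvScatter_closed]
  simp only
  rw [PySem.Dict.getD_foldl_modify_add_one, PySem.Dict.getD_empty, List.count_filterMap]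
  simp

theorem pvBroken_mem (d : PySem.Dict String Int) (s : List Int) :
    (s ∈ (pvScatter d).2) ↔ ∃ p ∈ pvPairs, s ∈ pvMiss d p := by
  rw [pvScatter_eq_pairs, pvScatter_closed]
  simp only
  rw [show (PySem.Set.empty : PySem.Set (List Int)) = [] from rfl,
      ← PySem.Set.ofList_eq_foldl]
  rw [PySem.Set.mem_ofList]
  exact List.mem_flatMap

-- pvCombos: the 64 visible triples
def pvCombos : List (List Int) :=
  pvVals.flatMap fun a => pvVals.flatMap fun b => pvVals.map fun c => [a, b, c]

set_option maxRecDepth 8000 in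
theorem pvPairs_eq : pvPairs =
    (pvCombos.map (fun o => ((0 : Int), o))) ++ (pvCombos.map (fun o => ((1 : Int), o))) ++
    (pvCombos.map (fun o => ((2 : Int), o))) ++ (pvCombos.map (fun o => ((3 : Int), o))) := by
  decide

set_option maxRecDepth 8000 in
theorem pvCombos_nodup : pvCombos.Nodup := by decide

theorem pvCombos_shape (o : List Int) (h : o ∈ pvCombos) : ∃ x y z, o = [x, y, z] := by
  simp only [pvCombos, List.mem_flatMap, List.mem_map] at h
  obtain ⟨x, -, y, -, z, -, rfl⟩ := h
  exact ⟨x, y, z, rfl⟩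

theorem pvCombos_mem (x y z : Int) (hx : x ∈ pvVals) (hy : y ∈ pvVals) (hz : z ∈ pvVals) :
    [x, y, z] ∈ pvCombos := by
  simp only [pvCombos, List.mem_flatMap, List.mem_map]
  exact ⟨x, hx, y, hy, z, hz, rfl⟩

-- countP over a Nodup list with at most one satisfier
theorem pvCountP_unique {α : Type} (l : List α) (p : α → Bool) (t : α) (hnd : l.Nodup)
    (ht : t ∈ l) (hu : ∀ x ∈ l, p x = true → x = t) :
    l.countP p = if p t then 1 else 0 := by
  induction l with
  | nil => cases ht
  | cons x xs ih =>
    rcases List.mem_cons.mp ht with rfl | htl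
    · have hxs : xs.countP p = 0 := by
        rw [List.countP_eq_zero]
        intro y hy hpy
        exact absurd ((hu y (List.mem_cons_of_mem _ hy) hpy) ▸ hy) (List.nodup_cons.mp hnd).1
      rw [List.countP_cons, hxs]
      by_cases hpt : p t = true <;> simp [hpt]
    · have hxt : x ≠ t := by
        rintro rfl; exact (List.nodup_cons.mp hnd).1 htl
      have hpx : p x = false := by
        cases hpx : p x
        · rfl
        · exact absurd (hu x List.mem_cons_self hpx) hxt
      rw [List.countP_cons, hpx]
      simp [ih (List.nodup_cons.mp hnd).2 htl
        (fun y hy hpy => hu y (List.mem_cons_of_mem _ hy) hpy)]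

-- per-position block count: the only triple that can score s = [a,b,c,dd] at position i is s with
-- position i removed, and it scores iff the response at the masked key is exactly s's value there
theorem pvBlock0 (d : PySem.Dict String Int) (a b c dd : Int)
    (ha : a ∈ pvVals) (hb : b ∈ pvVals) (hc : c ∈ pvVals) (hd : dd ∈ pvVals) :
    pvCombos.countP (fun o => pvHit d (0, o) == some [a, b, c, dd]) =
      if PySem.Dict.get? d (pvPlayerSees 0 [a, b, c, dd]) == some a then 1 else 0 := by
  rw [pvCountP_unique pvCombos _ [b, c, dd] pvCombos_nodup (pvCombos_mem b c dd hb hc hd)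
    (fun o ho hp => by
      obtain ⟨x, y, z, rfl⟩ := pvCombos_shape o ho
      simp only [pvHit] at hp
      cases hg : PySem.Dict.get? d (pvSeenKey 0 [x, y, z]) with
      | none => rw [hg] at hp; simp at hp
      | some v =>
        rw [hg] at hp
        dsimp only at hp
        by_cases hv : v ∈ pvVals
        · rw [if_pos hv] at hp
          have h2 : pvInsAt 0 [x, y, z] v = [a, b, c, dd] := by simpa using hp
          have h3 : ([v, x, y, z] : List Int) = [a, b, c, dd] := h2
          simp only [List.cons.injEq, and_true] at h3
          obtain ⟨-, rfl, rfl, rfl⟩ := h3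
          rfl
        · rw [if_neg hv] at hp; simp at hp)]
  have key : pvSeenKey 0 [b, c, dd] = pvPlayerSees 0 [a, b, c, dd] := rfl
  simp only [pvHit, key]
  cases hg : PySem.Dict.get? d (pvPlayerSees 0 [a, b, c, dd]) with
  | none => simp
  | some v =>
    by_cases hv : v = a
    · subst hv
      have hins : pvInsAt 0 [b, c, dd] v = [v, b, c, dd] := rfl
      simp [ha, hins]
    · by_cases hvv : v ∈ pvVals <;>
        simp [hvv, show pvInsAt 0 [b, c, dd] v = [v, b, c, dd] from rfl, hv]

theorem pvBlock1 (d : PySem.Dict String Int) (a b c dd : Int)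
    (ha : a ∈ pvVals) (hb : b ∈ pvVals) (hc : c ∈ pvVals) (hd : dd ∈ pvVals) :
    pvCombos.countP (fun o => pvHit d (1, o) == some [a, b, c, dd]) =
      if PySem.Dict.get? d (pvPlayerSees 1 [a, b, c, dd]) == some b then 1 else 0 := by
  rw [pvCountP_unique pvCombos _ [a, c, dd] pvCombos_nodup (pvCombos_mem a c dd ha hc hd)
    (fun o ho hp => by
      obtain ⟨x, y, z, rfl⟩ := pvCombos_shape o ho
      simp only [pvHit] at hp
      cases hg : PySem.Dict.get? d (pvSeenKey 1 [x, y, z]) with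
      | none => rw [hg] at hp; simp at hp
      | some v =>
        rw [hg] at hp
        dsimp only at hp
        by_cases hv : v ∈ pvVals
        · rw [if_pos hv] at hp
          have h2 : pvInsAt 1 [x, y, z] v = [a, b, c, dd] := by simpa using hp
          have h3 : ([x, v, y, z] : List Int) = [a, b, c, dd] := h2
          simp only [List.cons.injEq, and_true] at h3
          obtain ⟨rfl, -, rfl, rfl⟩ := h3
          rfl
        · rw [if_neg hv] at hp; simp at hp)]
  have key : pvSeenKey 1 [a, c, dd] = pvPlayerSees 1 [a, b, c, dd] := rfl
  simp only [pvHit, key]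
  cases hg : PySem.Dict.get? d (pvPlayerSees 1 [a, b, c, dd]) with
  | none => simp
  | some v =>
    by_cases hv : v = b
    · subst hv
      have hins : pvInsAt 1 [a, c, dd] v = [a, v, c, dd] := rfl
      simp [hb, hins]
    · by_cases hvv : v ∈ pvVals <;>
        simp [hvv, show pvInsAt 1 [a, c, dd] v = [a, v, c, dd] from rfl, hv]

theorem pvBlock2 (d : PySem.Dict String Int) (a b c dd : Int)
    (ha : a ∈ pvVals) (hb : b ∈ pvVals) (hc : c ∈ pvVals) (hd : dd ∈ pvVals) :
    pvCombos.countP (fun o => pvHit d (2, o) == some [a, b, c, dd]) =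
      if PySem.Dict.get? d (pvPlayerSees 2 [a, b, c, dd]) == some c then 1 else 0 := by
  rw [pvCountP_unique pvCombos _ [a, b, dd] pvCombos_nodup (pvCombos_mem a b dd ha hb hd)
    (fun o ho hp => by
      obtain ⟨x, y, z, rfl⟩ := pvCombos_shape o ho
      simp only [pvHit] at hp
      cases hg : PySem.Dict.get? d (pvSeenKey 2 [x, y, z]) with
      | none => rw [hg] at hp; simp at hp
      | some v =>
        rw [hg] at hp
        dsimp only at hp
        by_cases hv : v ∈ pvVals
        · rw [if_pos hv] at hp
          have h2 : pvInsAt 2 [x, y, z] v = [a, b, c, dd] := by simpa using hp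
          have h3 : ([x, y, v, z] : List Int) = [a, b, c, dd] := h2
          simp only [List.cons.injEq, and_true] at h3
          obtain ⟨rfl, rfl, -, rfl⟩ := h3
          rfl
        · rw [if_neg hv] at hp; simp at hp)]
  have key : pvSeenKey 2 [a, b, dd] = pvPlayerSees 2 [a, b, c, dd] := rfl
  simp only [pvHit, key]
  cases hg : PySem.Dict.get? d (pvPlayerSees 2 [a, b, c, dd]) with
  | none => simp
  | some v =>
    by_cases hv : v = c
    · subst hv
      have hins : pvInsAt 2 [a, b, dd] v = [a, b, v, dd] := rfl
      simp [hc, hins]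
    · by_cases hvv : v ∈ pvVals <;>
        simp [hvv, show pvInsAt 2 [a, b, dd] v = [a, b, v, dd] from rfl, hv]

theorem pvBlock3 (d : PySem.Dict String Int) (a b c dd : Int)
    (ha : a ∈ pvVals) (hb : b ∈ pvVals) (hc : c ∈ pvVals) (hd : dd ∈ pvVals) :
    pvCombos.countP (fun o => pvHit d (3, o) == some [a, b, c, dd]) =
      if PySem.Dict.get? d (pvPlayerSees 3 [a, b, c, dd]) == some dd then 1 else 0 := by
  rw [pvCountP_unique pvCombos _ [a, b, c] pvCombos_nodup (pvCombos_mem a b c ha hb hc)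
    (fun o ho hp => by
      obtain ⟨x, y, z, rfl⟩ := pvCombos_shape o ho
      simp only [pvHit] at hp
      cases hg : PySem.Dict.get? d (pvSeenKey 3 [x, y, z]) with
      | none => rw [hg] at hp; simp at hp
      | some v =>
        rw [hg] at hp
        dsimp only at hp
        by_cases hv : v ∈ pvVals
        · rw [if_pos hv] at hp
          have h2 : pvInsAt 3 [x, y, z] v = [a, b, c, dd] := by simpa using hp
          have h3 : ([x, y, z, v] : List Int) = [a, b, c, dd] := h2
          simp only [List.cons.injEq, and_true] at h3
          obtain ⟨rfl, rfl, rfl, -⟩ := h3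
          rfl
        · rw [if_neg hv] at hp; simp at hp)]
  have key : pvSeenKey 3 [a, b, c] = pvPlayerSees 3 [a, b, c, dd] := rfl
  simp only [pvHit, key]
  cases hg : PySem.Dict.get? d (pvPlayerSees 3 [a, b, c, dd]) with
  | none => simp
  | some v =>
    by_cases hv : v = dd
    · subst hv
      have hins : pvInsAt 3 [a, b, c] v = [a, b, c, v] := rfl
      simp [hd, hins]
    · by_cases hvv : v ∈ pvVals <;>
        simp [hvv, show pvInsAt 3 [a, b, c] v = [a, b, c, v] from rfl, hv]

-- the total count for a scenario
theorem pvCounts_char (d : PySem.Dict String Int) (a b c dd : Int)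
    (ha : a ∈ pvVals) (hb : b ∈ pvVals) (hc : c ∈ pvVals) (hd : dd ∈ pvVals) :
    (pvScatter d).1.getD [a, b, c, dd] 0 =
      (if PySem.Dict.get? d (pvPlayerSees 0 [a, b, c, dd]) == some a then 1 else 0) +
      (if PySem.Dict.get? d (pvPlayerSees 1 [a, b, c, dd]) == some b then 1 else 0) +
      (if PySem.Dict.get? d (pvPlayerSees 2 [a, b, c, dd]) == some c then 1 else 0) +
      (if PySem.Dict.get? d (pvPlayerSees 3 [a, b, c, dd]) == some dd then 1 else 0) := by
  rw [pvCounts_getD, pvPairs_eq]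
  simp only [List.countP_append, List.countP_map]
  rw [show ((fun p => pvHit d p == some [a, b, c, dd]) ∘ fun o => ((0 : Int), o)) =
        (fun o => pvHit d (0, o) == some [a, b, c, dd]) from rfl,
      show ((fun p => pvHit d p == some [a, b, c, dd]) ∘ fun o => ((1 : Int), o)) =
        (fun o => pvHit d (1, o) == some [a, b, c, dd]) from rfl,
      show ((fun p => pvHit d p == some [a, b, c, dd]) ∘ fun o => ((2 : Int), o)) =
        (fun o => pvHit d (2, o) == some [a, b, c, dd]) from rfl,
      show ((fun p => pvHit d p == some [a, b, c, dd]) ∘ fun o => ((3 : Int), o)) =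
        (fun o => pvHit d (3, o) == some [a, b, c, dd]) from rfl,
      pvBlock0 d a b c dd ha hb hc hd, pvBlock1 d a b c dd ha hb hc hd,
      pvBlock2 d a b c dd ha hb hc hd, pvBlock3 d a b c dd ha hb hc hd]
  split_ifs <;> norm_num

-- broken membership for a scenario
theorem pvBroken_char (d : PySem.Dict String Int) (a b c dd : Int)
    (ha : a ∈ pvVals) (hb : b ∈ pvVals) (hc : c ∈ pvVals) (hd : dd ∈ pvVals) :
    ([a, b, c, dd] ∈ (pvScatter d).2) ↔
      (PySem.Dict.get? d (pvPlayerSees 0 [a, b, c, dd]) = none ∨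
       PySem.Dict.get? d (pvPlayerSees 1 [a, b, c, dd]) = none ∨
       PySem.Dict.get? d (pvPlayerSees 2 [a, b, c, dd]) = none ∨
       PySem.Dict.get? d (pvPlayerSees 3 [a, b, c, dd]) = none) := by
  rw [pvBroken_mem]
  constructor
  · rintro ⟨p, hp, hm⟩
    rw [pvPairs_eq] at hp
    simp only [List.mem_append, List.mem_map] at hp
    rcases hp with ((⟨o, ho, rfl⟩ | ⟨o, ho, rfl⟩) | ⟨o, ho, rfl⟩) | ⟨o, ho, rfl⟩
    · obtain ⟨x, y, z, rfl⟩ := pvCombos_shape o ho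
      simp only [pvMiss] at hm
      cases hg : PySem.Dict.get? d (pvSeenKey 0 [x, y, z]) with
      | some v => rw [hg] at hm; simp at hm
      | none =>
        rw [hg] at hm
        dsimp only at hm
        rcases List.mem_map.mp hm with ⟨v, hv, hins⟩
        have h3 : ([v, x, y, z] : List Int) = [a, b, c, dd] := hins
        simp only [List.cons.injEq, and_true] at h3
        obtain ⟨-, rfl, rfl, rfl⟩ := h3
        have hk : pvSeenKey 0 [x, y, z] = pvPlayerSees 0 [a, x, y, z] := rfl
        rw [hk] at hg
        exact Or.inl hg
    · obtain ⟨x, y, z, rfl⟩ := pvCombos_shape o ho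
      simp only [pvMiss] at hm
      cases hg : PySem.Dict.get? d (pvSeenKey 1 [x, y, z]) with
      | some v => rw [hg] at hm; simp at hm
      | none =>
        rw [hg] at hm
        dsimp only at hm
        rcases List.mem_map.mp hm with ⟨v, hv, hins⟩
        have h3 : ([x, v, y, z] : List Int) = [a, b, c, dd] := hins
        simp only [List.cons.injEq, and_true] at h3
        obtain ⟨rfl, -, rfl, rfl⟩ := h3
        have hk : pvSeenKey 1 [x, y, z] = pvPlayerSees 1 [x, b, y, z] := rfl
        rw [hk] at hg
        exact Or.inr (Or.inl hg)
    · obtain ⟨x, y, z, rfl⟩ := pvCombos_shape o ho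
      simp only [pvMiss] at hm
      cases hg : PySem.Dict.get? d (pvSeenKey 2 [x, y, z]) with
      | some v => rw [hg] at hm; simp at hm
      | none =>
        rw [hg] at hm
        dsimp only at hm
        rcases List.mem_map.mp hm with ⟨v, hv, hins⟩
        have h3 : ([x, y, v, z] : List Int) = [a, b, c, dd] := hins
        simp only [List.cons.injEq, and_true] at h3
        obtain ⟨rfl, rfl, -, rfl⟩ := h3
        have hk : pvSeenKey 2 [x, y, z] = pvPlayerSees 2 [x, y, c, z] := rfl
        rw [hk] at hg
        exact Or.inr (Or.inr (Or.inl hg))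
    · obtain ⟨x, y, z, rfl⟩ := pvCombos_shape o ho
      simp only [pvMiss] at hm
      cases hg : PySem.Dict.get? d (pvSeenKey 3 [x, y, z]) with
      | some v => rw [hg] at hm; simp at hm
      | none =>
        rw [hg] at hm
        dsimp only at hm
        rcases List.mem_map.mp hm with ⟨v, hv, hins⟩
        have h3 : ([x, y, z, v] : List Int) = [a, b, c, dd] := hins
        simp only [List.cons.injEq, and_true] at h3
        obtain ⟨rfl, rfl, rfl, -⟩ := h3
        have hk : pvSeenKey 3 [x, y, z] = pvPlayerSees 3 [x, y, z, dd] := rfl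
        rw [hk] at hg
        exact Or.inr (Or.inr (Or.inr hg))
  · rintro (h | h | h | h)
    · refine ⟨(0, [b, c, dd]), ?_, ?_⟩
      · rw [pvPairs_eq]
        simp only [List.mem_append, List.mem_map]
        exact Or.inl (Or.inl (Or.inl ⟨[b, c, dd], pvCombos_mem b c dd hb hc hd, rfl⟩))
      · simp only [pvMiss]
        have hk : pvSeenKey 0 [b, c, dd] = pvPlayerSees 0 [a, b, c, dd] := rfl
        rw [hk, h]
        exact List.mem_map.mpr ⟨a, ha, rfl⟩
    · refine ⟨(1, [a, c, dd]), ?_, ?_⟩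
      · rw [pvPairs_eq]
        simp only [List.mem_append, List.mem_map]
        exact Or.inl (Or.inl (Or.inr ⟨[a, c, dd], pvCombos_mem a c dd ha hc hd, rfl⟩))
      · simp only [pvMiss]
        have hk : pvSeenKey 1 [a, c, dd] = pvPlayerSees 1 [a, b, c, dd] := rfl
        rw [hk, h]
        exact List.mem_map.mpr ⟨b, hb, rfl⟩
    · refine ⟨(2, [a, b, dd]), ?_, ?_⟩
      · rw [pvPairs_eq]
        simp only [List.mem_append, List.mem_map]
        exact Or.inl (Or.inr ⟨[a, b, dd], pvCombos_mem a b dd ha hb hd, rfl⟩)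
      · simp only [pvMiss]
        have hk : pvSeenKey 2 [a, b, dd] = pvPlayerSees 2 [a, b, c, dd] := rfl
        rw [hk, h]
        exact List.mem_map.mpr ⟨c, hc, rfl⟩
    · refine ⟨(3, [a, b, c]), ?_, ?_⟩
      · rw [pvPairs_eq]
        simp only [List.mem_append, List.mem_map]
        exact Or.inr ⟨[a, b, c], pvCombos_mem a b c ha hb hc, rfl⟩
      · simp only [pvMiss]
        have hk : pvSeenKey 3 [a, b, c] = pvPlayerSees 3 [a, b, c, dd] := rfl
        rw [hk, h]
        exact List.mem_map.mpr ⟨dd, hd, rfl⟩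


-- A's test_scen on a length-4 scenario
theorem pvTestScen_char (d : PySem.Dict String Int) (a b c dd : Int) :
    pvTestScen [a, b, c, dd] d =
      if ((PySem.Dict.get? d (pvPlayerSees 0 [a, b, c, dd])).isSome &&
          (PySem.Dict.get? d (pvPlayerSees 1 [a, b, c, dd])).isSome &&
          (PySem.Dict.get? d (pvPlayerSees 2 [a, b, c, dd])).isSome &&
          (PySem.Dict.get? d (pvPlayerSees 3 [a, b, c, dd])).isSome) then
        some ((if PySem.Dict.get? d (pvPlayerSees 0 [a, b, c, dd]) == some a then 1 else 0) +
              (if PySem.Dict.get? d (pvPlayerSees 1 [a, b, c, dd]) == some b then 1 else 0) +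
              (if PySem.Dict.get? d (pvPlayerSees 2 [a, b, c, dd]) == some c then 1 else 0) +
              (if PySem.Dict.get? d (pvPlayerSees 3 [a, b, c, dd]) == some dd then 1 else 0))
      else none := by
  unfold pvTestScen
  rw [show (([a, b, c, dd] : List Int).length : Int) = 4 from rfl,
      show PySem.List.pyRange 0 4 1 = ([0, 1, 2, 3] : List Int) from by decide]
  simp only [List.foldl_cons, List.foldl_nil,
    show PySem.List.pyGet? [a, b, c, dd] 0 = some a from rfl,
    show PySem.List.pyGet? [a, b, c, dd] 1 = some b from rfl,
    show PySem.List.pyGet? [a, b, c, dd] 2 = some c from rfl,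
    show PySem.List.pyGet? [a, b, c, dd] 3 = some dd from rfl]
  cases h0 : PySem.Dict.get? d (pvPlayerSees 0 [a, b, c, dd]) <;>
    cases h1 : PySem.Dict.get? d (pvPlayerSees 1 [a, b, c, dd]) <;>
      cases h2 : PySem.Dict.get? d (pvPlayerSees 2 [a, b, c, dd]) <;>
        cases h3 : PySem.Dict.get? d (pvPlayerSees 3 [a, b, c, dd]) <;>
          simp only [Option.bind_some, Option.bind_none, Option.map_some,
            Option.isSome_some, Option.isSome_none, Bool.true_and, Bool.false_and,
            reduceIte] <;>
          (try rfl) <;>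
          · rename_i v0 v1 v2 v3
            by_cases e0 : v0 = a <;> by_cases e1 : v1 = b <;> by_cases e2 : v2 = c <;>
              by_cases e3 : v3 = dd <;>
              simp [e0, e1, e2, e3]

def pvStepA (d : PySem.Dict String Int) (n : Int)
    (acc : List (List Int) × List (List Int) × List (List Int)) (scen : List Int) :
    List (List Int) × List (List Int) × List (List Int) :=
  match pvTestScen scen d with
  | some l =>
    let h := if l ≥ n then acc.1 ++ [scen] else acc.1
    let du := if l > n then acc.2.2 ++ [scen] else acc.2.2
    let r := if l < n then acc.2.1 ++ [scen] else acc.2.1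
    (h, r, du)
  | none => (acc.1, acc.2.1 ++ [scen], acc.2.2)

def pvStepB (d : PySem.Dict String Int) (n : Int)
    (st : List (List Int) × List (List Int) × List (List Int)) (scen : List Int) :
    List (List Int) × List (List Int) × List (List Int) :=
  if PySem.Set.contains (pvScatter d).2 scen then
    (st.1, st.2.1 ++ [scen], st.2.2)
  else
    let m := (pvScatter d).1.getD scen 0
    let h := if m ≥ n then st.1 ++ [scen] else st.1
    let du := if m > n then st.2.2 ++ [scen] else st.2.2
    let r := if m < n then st.2.1 ++ [scen] else st.2.1
    (h, r, du)

theorem pvA_eq (resp : List (String × Int)) (n : Int) :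
    determine_handled_cases resp n =
      (let st := pvScens.foldl (pvStepA (PySem.Dict.mk resp) n) ([], [], [])
       (st.1, st.2.1, st.2.2)) := by
  unfold determine_handled_cases pvStepA
  rw [pvGen_eq]

theorem pvB_eq (resp : List (String × Int)) (n : Int) :
    determine_handled_cases_alt resp n =
      (let st := pvScens.foldl (pvStepB (PySem.Dict.mk resp) n) ([], [], [])
       (st.1, st.2.1, st.2.2)) := by
  unfold determine_handled_cases_alt pvStepB pvScens
  simp only [List.foldl_flatMap, List.foldl_map]

theorem pvScens_shape (s : List Int) (h : s ∈ pvScens) :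
    ∃ a b c dd, a ∈ pvVals ∧ b ∈ pvVals ∧ c ∈ pvVals ∧ dd ∈ pvVals ∧ s = [a, b, c, dd] := by
  simp only [pvScens, List.mem_flatMap, List.mem_map] at h
  obtain ⟨a, ha, b, hb, c, hc, dd, hd, rfl⟩ := h
  exact ⟨a, b, c, dd, ha, hb, hc, hd, rfl⟩

theorem pvStep_eq (d : PySem.Dict String Int) (n : Int)
    (acc : List (List Int) × List (List Int) × List (List Int)) (a b c dd : Int)
    (ha : a ∈ pvVals) (hb : b ∈ pvVals) (hc : c ∈ pvVals) (hd : dd ∈ pvVals) :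
    pvStepA d n acc [a, b, c, dd] = pvStepB d n acc [a, b, c, dd] := by
  have hbr := pvBroken_char d a b c dd ha hb hc hd
  have hcnt := pvCounts_char d a b c dd ha hb hc hd
  unfold pvStepA pvStepB
  rw [pvTestScen_char, PySem.Set.contains_eq_decide]
  cases h0 : PySem.Dict.get? d (pvPlayerSees 0 [a, b, c, dd]) <;>
    cases h1 : PySem.Dict.get? d (pvPlayerSees 1 [a, b, c, dd]) <;>
      cases h2 : PySem.Dict.get? d (pvPlayerSees 2 [a, b, c, dd]) <;>
        cases h3 : PySem.Dict.get? d (pvPlayerSees 3 [a, b, c, dd]) <;>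
          rw [h0, h1, h2, h3] at hbr hcnt <;>
          simp only [Option.isSome_some, Option.isSome_none, Bool.true_and, Bool.false_and,
            reduceIte] <;>
          simp only [reduceCtorEq, not_false_eq_true, or_true, true_or, or_self,
            or_false, iff_true, iff_false] at hbr <;>
          first
          | (rw [decide_eq_true hbr]; simp)
          | (rw [decide_eq_false (by simp [hbr])]
             rw [hcnt]
             simp)

-- ===== VERDICT (by name: the statement is the Claim_ definition above) =====
theorem determine_handled_cases_spec : Claim_equal_determine_handled_cases := by
  intro resp n _
  unfold Spec_determine_handled_cases
  rw [pvA_eq, pvB_eq]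
  have hfold : pvScens.foldl (pvStepA (PySem.Dict.mk resp) n) ([], [], []) =
      pvScens.foldl (pvStepB (PySem.Dict.mk resp) n) ([], [], []) := by
    refine PySem.List.foldl_congr_mem _ _ _ _ (fun acc s hs => ?_)
    obtain ⟨a, b, c, dd, ha, hb, hc, hd, rfl⟩ := pvScens_shape s hs
    exact pvStep_eq (PySem.Dict.mk resp) n acc a b c dd ha hb hc hd
  rw [hfold]
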